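-- pv_equiv track=rewrite | github.com/anigmo97/Sentiment_Analysis | mongo_conector.py | get_user_who_liked_dict_merge
-- ===== SOURCE A (Python) =====
-- def get_user_who_liked_dict_merge(dict_1,dict_2):
--     merged_dict = dict_1.copy()
--     new_likes = 0
--     for k,v in dict_2.items():
--         if k not in dict_1:
--             merged_dict[k] =v
--             new_likes +=1
--     return merged_dict,new_likes
-- ===== SOURCE B (Python) =====
-- def get_user_who_liked_dict_merge(dict_1, dict_2):
--     merged_dict = {**dict_1, **dict_2, **dict_1}
--     return merged_dict, len(merged_dict) - len(dict_1)
-- ===== Notes on version B (the rewrite author's own statement) =====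
-- stated objective: simpler
-- what changed: Replaces A's membership-test-and-counter loop by a triple dict unpacking {**dict_1, **dict_2, **dict_1} (overwrite-in-place restores dict_1's values while keeping A's insertion order) and derives the count as len(merged) - len(dict_1) from container sizes, with no per-key test or counter.
import Mathlib
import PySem

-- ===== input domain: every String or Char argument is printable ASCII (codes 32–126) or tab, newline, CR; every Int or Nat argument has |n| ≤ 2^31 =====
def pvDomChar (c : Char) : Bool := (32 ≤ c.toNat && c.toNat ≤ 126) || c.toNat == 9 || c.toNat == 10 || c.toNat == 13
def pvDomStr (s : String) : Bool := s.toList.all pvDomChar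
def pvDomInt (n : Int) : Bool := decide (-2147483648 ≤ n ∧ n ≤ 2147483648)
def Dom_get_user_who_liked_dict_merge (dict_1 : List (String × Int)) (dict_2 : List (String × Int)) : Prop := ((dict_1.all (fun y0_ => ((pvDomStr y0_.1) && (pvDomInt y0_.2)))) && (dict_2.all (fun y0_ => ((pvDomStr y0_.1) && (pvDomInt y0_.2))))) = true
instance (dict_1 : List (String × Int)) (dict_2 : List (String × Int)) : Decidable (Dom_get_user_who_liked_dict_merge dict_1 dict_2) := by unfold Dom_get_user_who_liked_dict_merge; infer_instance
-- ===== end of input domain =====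

-- B replaces A's membership-test-and-counter loop by a triple dict-unpacking merge ({**d1, **d2, **d1}) and a size subtraction for the count (simpler decomposition, same cost).


-- ===== PORT A =====
def get_user_who_liked_dict_merge (dict_1 : List (String × Int)) (dict_2 : List (String × Int)) : (List (String × Int)) × Int :=
  -- merged_dict = dict_1.copy(); new_likes = 0; for k,v in dict_2.items(): if k not in dict_1: merged_dict[k]=v; new_likes += 1
  let st := dict_2.foldl
    (fun (st : PySem.Dict String Int × Int) p =>
      if (PySem.Dict.mk dict_1).contains p.1 then st
      else (st.1.insert p.1 p.2, st.2 + 1))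
    (PySem.Dict.mk dict_1, 0)
  (st.1.items, st.2)

-- ===== PORT B =====
def get_user_who_liked_dict_merge_alt (dict_1 : List (String × Int)) (dict_2 : List (String × Int)) : (List (String × Int)) × Int :=
  -- merged_dict = {**dict_1, **dict_2, **dict_1}  (build a fresh dict, inserting dict_1, then dict_2, then dict_1 again)
  let merged := dict_1.foldl (fun (d : PySem.Dict String Int) p => d.insert p.1 p.2)
    (dict_2.foldl (fun (d : PySem.Dict String Int) p => d.insert p.1 p.2)
      (dict_1.foldl (fun (d : PySem.Dict String Int) p => d.insert p.1 p.2) PySem.Dict.empty))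
  -- return merged_dict, len(merged_dict) - len(dict_1)
  (merged.items, (merged.size : Int) - ((PySem.Dict.mk dict_1).size : Int))

-- ===== PRECONDITION & SPEC =====
-- Pre_ excludes association lists that repeat a key: both arguments are Python dicts, whose
-- items() never repeats a key, so no Python-reachable input is excluded.
def Pre_get_user_who_liked_dict_merge (dict_1 : List (String × Int)) (dict_2 : List (String × Int)) : Prop :=
  (dict_1.map Prod.fst).Nodup ∧ (dict_2.map Prod.fst).Nodup
instance (dict_1 : List (String × Int)) (dict_2 : List (String × Int)) : Decidable (Pre_get_user_who_liked_dict_merge dict_1 dict_2) := by unfold Pre_get_user_who_liked_dict_merge; infer_instance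
def pvWitness_get_user_who_liked_dict_merge : (List (String × Int)) × (List (String × Int)) :=
  ([("a", 1)], [("a", 2), ("b", 3)])
def Spec_get_user_who_liked_dict_merge (dict_1 : List (String × Int)) (dict_2 : List (String × Int)) (out : (List (String × Int)) × Int) : Prop := out = get_user_who_liked_dict_merge_alt dict_1 dict_2
instance (dict_1 : List (String × Int)) (dict_2 : List (String × Int)) (out : (List (String × Int)) × Int) : Decidable (Spec_get_user_who_liked_dict_merge dict_1 dict_2 out) := by unfold Spec_get_user_who_liked_dict_merge; infer_instance

-- ===== CLAIM (what is proved, stated in full; the proofs are below) =====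
def Claim_equal_get_user_who_liked_dict_merge : Prop := ∀ (dict_1 : List (String × Int)) (dict_2 : List (String × Int)), Dom_get_user_who_liked_dict_merge dict_1 dict_2 → Pre_get_user_who_liked_dict_merge dict_1 dict_2 → Spec_get_user_who_liked_dict_merge dict_1 dict_2 (get_user_who_liked_dict_merge dict_1 dict_2)

-- ===== LEMMAS AND PROOFS =====

-- first value bound to key k in an association list (what PySem.Dict.mk's lookup returns)
def pvLk (l : List (String × Int)) (k : String) : Option Int :=
  (l.find? (fun p => p.1 == k)).map Prod.snd

theorem pvLk_eq_none_of_not_mem (l : List (String × Int)) (k : String)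
    (h : k ∉ l.map Prod.fst) : pvLk l k = none := by
  simp only [pvLk, Option.map_eq_none_iff, List.find?_eq_none]
  intro p hp
  simp only [beq_iff_eq]
  exact fun he => h (he ▸ List.mem_map_of_mem hp)

-- a fold of inserts over a list with distinct keys: lookup is the list's binding, else the base dict's
theorem get?_foldl_insert (l : List (String × Int)) (hnd : (l.map Prod.fst).Nodup)
    (d : PySem.Dict String Int) (k : String) :
    (l.foldl (fun (d : PySem.Dict String Int) p => d.insert p.1 p.2) d).get? k
      = (pvLk l k).or (d.get? k) := by
  induction l generalizing d with
  | nil => simp [pvLk]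
  | cons p t ih =>
    simp only [List.map_cons, List.nodup_cons] at hnd
    rw [List.foldl_cons, ih hnd.2]
    by_cases h : p.1 = k
    · rw [pvLk_eq_none_of_not_mem t k (h ▸ hnd.1)]
      simp [pvLk, List.find?_cons, h, PySem.Dict.get?_insert_self]
    · rw [PySem.Dict.get?_insert_of_ne d p.2 (fun he => h he.symm)]
      simp [pvLk, List.find?_cons, h]

-- A's loop over dict_2 with paired state = a fold of the inserts of the filtered items, plus the filtered length as count.
theorem loopA (D1 : PySem.Dict String Int) (d2 : List (String × Int)) (d : PySem.Dict String Int) (c : Int) :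
    d2.foldl (fun (st : PySem.Dict String Int × Int) p =>
        if D1.contains p.1 then st else (st.1.insert p.1 p.2, st.2 + 1)) (d, c)
      = ((d2.filter (fun p => !D1.contains p.1)).foldl
           (fun (d : PySem.Dict String Int) p => d.insert p.1 p.2) d,
         c + ((d2.filter (fun p => !D1.contains p.1)).length : Int)) := by
  induction d2 generalizing d c with
  | nil => simp
  | cons p t ih =>
    by_cases h : D1.contains p.1
    · simp [List.foldl_cons, h, ih]
    · simp only [List.foldl_cons, List.filter_cons, h, Bool.not_false, if_true]
      rw [ih]
      simp
      omega

-- first binding of key k in an association list with distinct keys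
theorem pvLk_of_mem (l : List (String × Int)) (hnd : (l.map Prod.fst).Nodup)
    (p : String × Int) (hp : p ∈ l) : pvLk l p.1 = some p.2 := by
  induction l with
  | nil => cases hp
  | cons q t ih =>
    simp only [List.map_cons, List.nodup_cons] at hnd
    rcases List.mem_cons.1 hp with rfl | hpt
    · simp [pvLk]
    · have hne : (q.1 == p.1) = false := by
        simp only [beq_eq_false_iff_ne]
        intro he
        exact hnd.1 (he ▸ List.mem_map_of_mem hpt)
      simp only [pvLk, List.find?_cons, hne]
      exact ih hnd.2 hpt

theorem set_update_self (s : List String) (l : List String) (h : ∀ x ∈ l, x ∈ s) :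
    PySem.Set.update s l = s := by
  rw [PySem.Set.update_eq_append_filter, List.filter_eq_nil_iff.2, List.append_nil]
  intro a ha
  simp [h a ((PySem.Set.mem_ofList l a).1 ha)]

-- ===== VERDICT (by name: the statement is the Claim_ definition above) =====
theorem get_user_who_liked_dict_merge_spec : Claim_equal_get_user_who_liked_dict_merge := by
  intro d1 d2 _ hpre
  obtain ⟨h1, h2⟩ := hpre
  simp only [Spec_get_user_who_liked_dict_merge, get_user_who_liked_dict_merge,
    get_user_who_liked_dict_merge_alt]
  rw [loopA]
  set F := d2.filter (fun p => !(PySem.Dict.mk d1).contains p.1) with hF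
  set M := d1.foldl (fun (d : PySem.Dict String Int) p => d.insert p.1 p.2)
    (d2.foldl (fun (d : PySem.Dict String Int) p => d.insert p.1 p.2)
      (d1.foldl (fun (d : PySem.Dict String Int) p => d.insert p.1 p.2) PySem.Dict.empty)) with hM
  have hFsub : F.Sublist d2 := List.filter_sublist
  have hFnd : (F.map Prod.fst).Nodup := h2.sublist (hFsub.map _)
  have hFfresh : ∀ p ∈ F, (PySem.Dict.mk d1).contains p.1 = false := by
    intro p hp
    have := (List.mem_filter.1 hp).2
    simpa using this
  have hFnotd1 : ∀ k ∈ F.map Prod.fst, k ∉ d1.map Prod.fst := by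
    intro k hk hmem
    obtain ⟨p, hp, rfl⟩ := List.mem_map.1 hk
    have hc := hFfresh p hp
    rw [PySem.Dict.contains_eq_decide_mem_keys] at hc
    exact absurd hc (by simpa using hmem)
  -- A's merged dict: dict_1's items with the fresh items of dict_2 appended
  have hAitems : (F.foldl (fun (d : PySem.Dict String Int) p => d.insert p.1 p.2)
      (PySem.Dict.mk d1)).items = d1 ++ F := by
    have := PySem.Dict.items_foldl_insert_fresh F Prod.fst Prod.snd (PySem.Dict.mk d1) hFfresh hFnd
    simpa using this
  -- B's merged dict: lookup is d1's binding, else d2's, else d1's again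
  have hMget : ∀ k, M.get? k = (pvLk d1 k).or ((pvLk d2 k).or ((pvLk d1 k).or none)) := by
    intro k
    rw [hM, get?_foldl_insert d1 h1, get?_foldl_insert d2 h2, get?_foldl_insert d1 h1]
    rfl
  -- B's key list
  have hMkeys : M.keys = d1.map Prod.fst ++ F.map Prod.fst := by
    rw [hM, PySem.Dict.keys_foldl_insert_key, PySem.Dict.keys_foldl_insert_key,
      PySem.Dict.keys_foldl_insert_key]
    have e1 : PySem.Set.update (PySem.Dict.empty : PySem.Dict String Int).keys (d1.map Prod.fst)
        = d1.map Prod.fst := by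
      rw [PySem.Dict.keys_empty, PySem.Set.update_nil_left, PySem.Set.ofList_eq_self_of_nodup _ h1]
    have e2 : PySem.Set.update (d1.map Prod.fst) (d2.map Prod.fst)
        = d1.map Prod.fst ++ F.map Prod.fst := by
      rw [PySem.Set.update_eq_append_filter, PySem.Set.ofList_eq_self_of_nodup _ h2]
      congr 1
      rw [hF, show (fun p : String × Int => !(PySem.Dict.mk d1).contains p.1)
        = ((fun k => !(PySem.Dict.mk d1).contains k) ∘ Prod.fst) from rfl, ← List.filter_map]
      apply List.filter_congr
      intro k _
      rw [PySem.Dict.contains_eq_decide_mem_keys]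
      have hkeys : ({ items := d1 } : PySem.Dict String Int).keys = d1.map Prod.fst := rfl
      by_cases hk : k ∈ d1.map Prod.fst <;>
        simp [hkeys, hk]
    rw [e1, e2, set_update_self]
    intro x hx
    exact List.mem_append_left _ hx
  have hMnd : M.keys.Nodup := by
    rw [hMkeys]
    exact List.Nodup.append h1 hFnd (fun k hk1 hk2 => hFnotd1 k hk2 hk1)
  -- B's items coincide with A's
  have hMitems : M.items = d1 ++ F := by
    rw [PySem.Dict.items_eq_map_keys M hMnd 0, hMkeys, List.map_append]
    congr 1
    · rw [List.map_map]
      conv_rhs => rw [show d1 = d1.map id from (List.map_id d1).symm]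
      apply List.map_congr_left
      intro p hp
      have : M.getD p.1 0 = p.2 := by
        rw [PySem.Dict.getD_eq_get?_getD, hMget, pvLk_of_mem d1 h1 p hp]
        rfl
      simp [Function.comp, this]
    · rw [List.map_map]
      conv_rhs => rw [show F = F.map id from (List.map_id F).symm]
      apply List.map_congr_left
      intro p hp
      have hnotin : p.1 ∉ d1.map Prod.fst := hFnotd1 p.1 (List.mem_map_of_mem hp)
      have : M.getD p.1 0 = p.2 := by
        rw [PySem.Dict.getD_eq_get?_getD, hMget, pvLk_eq_none_of_not_mem d1 p.1 hnotin,
          pvLk_of_mem d2 h2 p (hFsub.subset hp)]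
        rfl
      simp [Function.comp, this]
  have hsize : (M.size : Int) = (d1.length : Int) + F.length := by
    show ((M.items.length : Nat) : Int) = _
    rw [hMitems]
    push_cast [List.length_append]
    ring
  refine Prod.ext ?_ ?_
  · simpa using (hAitems.trans hMitems.symm)
  · show (0 : Int) + F.length = (M.size : Int) - ((PySem.Dict.mk d1).size : Int)
    rw [hsize]
    show (0 : Int) + F.length = (d1.length : Int) + F.length - (d1.length : Int)
    ring
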